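-- pv_equiv track=rewrite | github.com/selengetu/Python_scripts | 100_sql_scripts/consecutive_groups.py | max_consecutive
-- ===== SOURCE A (Python) =====
-- def max_consecutive(workshops):
--     workshops.sort()
--     best = current = workshops[0][1]
--     prev = workshops[0][0]
--     for year, count in workshops[1:]:
--         if year == prev + 1:
--             current += count
--         else:
--             current = count
--         best = max(best, current)
--         prev = year
--     return best
-- ===== SOURCE B (Python) =====
-- def max_consecutive(workshops):
--     workshops.sort()
--     # phase 1: split the sorted list into runs of strictly consecutive years
--     runs = [[workshops[0][1]]]
--     prev = workshops[0][0]
--     for year, count in workshops[1:]: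
--         if year == prev + 1:
--             runs[-1].append(count)
--         else:
--             runs.append([count])
--         prev = year
--     # phase 2: best prefix sum of one run
--     def best_prefix(run):
--         s = run[0]
--         best = s
--         for c in run[1:]:
--             s += c
--             best = max(best, s)
--         return best
--     return max(best_prefix(r) for r in runs)
-- ===== Notes on version B (the rewrite author's own statement) =====
-- stated objective: alternative
-- what changed: Replaces the single fused scan carrying (best, current, prev) by a two-phase decomposition: first split the sorted list into consecutive-year runs, then take the maximum prefix sum within each run and the maximum over runs.
import Mathlib
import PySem

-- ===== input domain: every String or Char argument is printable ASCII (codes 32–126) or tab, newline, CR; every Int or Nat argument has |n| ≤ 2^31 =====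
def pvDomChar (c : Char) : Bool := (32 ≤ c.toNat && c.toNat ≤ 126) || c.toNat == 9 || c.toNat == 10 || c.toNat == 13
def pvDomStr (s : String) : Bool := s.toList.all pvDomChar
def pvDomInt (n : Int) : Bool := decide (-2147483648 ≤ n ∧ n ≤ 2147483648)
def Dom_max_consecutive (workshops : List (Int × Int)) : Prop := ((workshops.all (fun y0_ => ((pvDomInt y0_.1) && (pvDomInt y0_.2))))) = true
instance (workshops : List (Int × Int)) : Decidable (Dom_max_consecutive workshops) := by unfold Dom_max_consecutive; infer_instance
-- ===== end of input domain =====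

-- B replaces A's fused (best, current, prev) scan by two phases: split the sorted list
-- into consecutive-year runs, then maximise prefix sums per run.  Both A and B sort the
-- argument list in place (same mutation); the equivalence proved is about the return value.

-- ===== PORT A =====
-- A's loop over workshops[1:] with state (best, current, prev)
def pvLoopA (rest : List (Int × Int)) (st : Int × Int × Int) : Int × Int × Int :=
  rest.foldl
    (fun st yc =>
      let cur := if yc.1 = st.2.2 + 1 then st.2.1 + yc.2 else yc.2
      (max st.1 cur, cur, yc.1)) st

def max_consecutive (workshops : List (Int × Int)) : Int :=
  let ws := PySem.List.sorted2 workshops (fun p => p.1) (fun p => p.2)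
  match ws with
  | [] => 0   -- workshops[0] raises IndexError in Python; excluded by Pre_
  | (y0, c0) :: rest => (pvLoopA rest (c0, c0, y0)).1

-- ===== PORT B =====
-- runs[-1].append(c)
def pvAppendLast (runs : List (List Int)) (c : Int) : List (List Int) :=
  match runs with
  | [] => [[c]]
  | [r] => [r ++ [c]]
  | r :: t => r :: pvAppendLast t c

-- phase 1 loop: state (runs, prev)
def pvBuildRuns (rest : List (Int × Int)) (runs : List (List Int)) (prev : Int) :
    List (List Int) :=
  match rest with
  | [] => runs
  | (y, c) :: t =>
    if y = prev + 1 then pvBuildRuns t (pvAppendLast runs c) y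
    else pvBuildRuns t (runs ++ [[c]]) y

-- phase 2: best prefix sum of a run, state (best, s) over run[1:]
def pvBestPrefix (run : List Int) : Int :=
  match run with
  | [] => 0   -- unreachable: runs are nonempty
  | c :: t => (t.foldl (fun st c => (max st.1 (st.2 + c), st.2 + c)) (c, c)).1

-- max(generator) over the nonempty list of runs
def pvMaxOf (xs : List Int) : Int :=
  match xs with
  | [] => 0   -- unreachable: runs is nonempty
  | m :: t => t.foldl max m

def max_consecutive_alt (workshops : List (Int × Int)) : Int :=
  let ws := PySem.List.sorted2 workshops (fun p => p.1) (fun p => p.2)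
  match ws with
  | [] => 0   -- workshops[0] raises IndexError in Python; excluded by Pre_
  | (y0, c0) :: rest =>
    pvMaxOf ((pvBuildRuns rest [[c0]] y0).map pvBestPrefix)

-- ===== PRECONDITION & SPEC =====
-- Pre_ excludes exactly the empty list, on which Python A raises IndexError (workshops[0]).
def Pre_max_consecutive (workshops : List (Int × Int)) : Prop := workshops ≠ []
instance (workshops : List (Int × Int)) : Decidable (Pre_max_consecutive workshops) := by unfold Pre_max_consecutive; infer_instance
def pvWitness_max_consecutive : (List (Int × Int)) := [(2020, 3), (2021, -1), (2023, 5)]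

def Spec_max_consecutive (workshops : List (Int × Int)) (out : Int) : Prop := out = max_consecutive_alt workshops
instance (workshops : List (Int × Int)) (out : Int) : Decidable (Spec_max_consecutive workshops out) := by unfold Spec_max_consecutive; infer_instance

-- ===== CLAIM (what is proved, stated in full; the proofs are below) =====
def Claim_equal_max_consecutive : Prop := ∀ (workshops : List (Int × Int)), Dom_max_consecutive workshops → Pre_max_consecutive workshops → Spec_max_consecutive workshops (max_consecutive workshops)

-- ===== LEMMAS AND PROOFS =====

theorem pvAppendLast_closed (closed : List (List Int)) (r : List Int) (c : Int) :
    pvAppendLast (closed ++ [r]) c = closed ++ [r ++ [c]] := by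
  induction closed with
  | nil => rfl
  | cons h t ih =>
    cases t with
    | nil => simp [pvAppendLast]
    | cons h2 t2 => simpa [pvAppendLast] using ih

theorem pvBestPrefix_snd (t : List Int) (b s : Int) :
    (t.foldl (fun st c => (max st.1 (st.2 + c), st.2 + c)) (b, s)).2 = s + t.sum := by
  induction t generalizing b s with
  | nil => simp
  | cons h tl ih => simp [List.foldl, ih]; ring

theorem pvBestPrefix_append (c0 : Int) (t : List Int) (c : Int) :
    pvBestPrefix ((c0 :: t) ++ [c]) =
      max (pvBestPrefix (c0 :: t)) (c0 + t.sum + c) := by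
  simp only [pvBestPrefix, List.cons_append, List.foldl_append, List.foldl_cons,
    List.foldl_nil]
  rw [pvBestPrefix_snd]

theorem pvMaxOf_append_singleton (l : List Int) (x : Int) :
    pvMaxOf (l ++ [x]) = match l with | [] => x | _ => max (pvMaxOf l) x := by
  cases l with
  | nil => rfl
  | cons h t =>
    simp only [pvMaxOf, List.cons_append, List.foldl_append, List.foldl_cons,
      List.foldl_nil]

theorem pvKey (rest : List (Int × Int)) (closed : List (List Int)) (c0 : Int)
    (r : List Int) (prev : Int) :
    pvMaxOf ((pvBuildRuns rest (closed ++ [c0 :: r]) prev).map pvBestPrefix)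
      = (pvLoopA rest (pvMaxOf (closed.map pvBestPrefix ++ [pvBestPrefix (c0 :: r)]),
          c0 + r.sum, prev)).1 := by
  induction rest generalizing closed c0 r prev with
  | nil =>
    simp [pvBuildRuns, pvLoopA, List.map_append]
  | cons hd tl ih =>
    obtain ⟨y, c⟩ := hd
    by_cases hy : y = prev + 1
    · subst hy
      simp only [pvBuildRuns, if_true, pvAppendLast_closed]
      rw [show (c0 :: r) ++ [c] = c0 :: (r ++ [c]) from rfl] at *
      rw [ih closed c0 (r ++ [c]) (prev + 1)]
      have hbp := pvBestPrefix_append c0 r c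
      rw [List.cons_append] at hbp
      simp only [pvLoopA, List.foldl_cons, if_true, hbp, List.sum_append, List.sum_cons,
        List.sum_nil, add_zero]
      rcases closed.map pvBestPrefix with _ | ⟨m, t⟩
      · simp [pvMaxOf, add_assoc]
      · have h2 : ∀ (m : Int) (t : List Int) (x : Int),
            pvMaxOf (m :: (t ++ [x])) = max (pvMaxOf (m :: t)) x := by
          intro m t x
          simpa using pvMaxOf_append_singleton (m :: t) x
        simp [h2, max_assoc, add_assoc]
    · simp only [pvBuildRuns, if_neg hy]
      have hthis := ih (closed ++ [c0 :: r]) c [] y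
      simp only [List.append_assoc, List.singleton_append, List.sum_nil, add_zero] at hthis ⊢
      rw [hthis]
      simp only [pvLoopA, List.foldl_cons, if_neg hy]
      congr 2
      simp only [List.map_append, List.map_cons, List.map_nil]
      rw [show pvBestPrefix [c] = c from rfl]
      rw [pvMaxOf_append_singleton (closed.map pvBestPrefix ++ [pvBestPrefix (c0 :: r)]) c]
      rcases closed.map pvBestPrefix with _ | ⟨m, t⟩ <;> rfl

-- ===== VERDICT (by name: the statement is the Claim_ definition above) =====
theorem max_consecutive_spec : Claim_equal_max_consecutive := by
  intro workshops _ _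
  unfold Spec_max_consecutive max_consecutive max_consecutive_alt
  cases h : PySem.List.sorted2 workshops (fun p => p.1) (fun p => p.2) with
  | nil => rfl
  | cons hd rest =>
    obtain ⟨y0, c0⟩ := hd
    have := pvKey rest [] c0 [] y0
    simp only [List.nil_append, List.map_nil] at this
    simpa [pvMaxOf, pvBestPrefix] using this.symm
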